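-- pv_equiv track=rewrite | github.com/nanodotpy/MyProjectEulerEntries | Problem 32.py | pandigital_product
-- ===== SOURCE A (Python) =====
-- from math import ceil,sqrt
--
-- def divisors(number) :
--     divisors = []
--     for a in range(1,ceil(sqrt(number))+1) :
--         if number%a == 0:
--             divisors.append(a)
--             divisors.append(number//a)
--     return divisors
--
-- digits = set(range(1,10))
--
-- def pandigital_product(number) :
--     itsdivisors = divisors(number)
--     products = ['{}{}{}'.format(itsdivisors[e],itsdivisors[e+1],number) for e in range(0,len(itsdivisors)-1,2)]
--     products = [list(product) for product in products]
--
--     for a in products :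
--         a = [int(e) for e in a ]
--
--         if digits == set(a) :
--             break
--
--     else :
--         return False
--
--     return True
-- ===== SOURCE B (Python) =====
-- from math import ceil, sqrt
--
--
-- def _digs(n):
--     ds = []
--     while n > 0:
--         ds.append(n % 10)
--         n //= 10
--     return ds
--
--
-- def pandigital_product(number):
--     for a in range(1, ceil(sqrt(number)) + 1):
--         if number % a == 0:
--             if set(_digs(a) + _digs(number // a) + _digs(number)) == set(range(1, 10)):
--                 return True
--     return False
-- ===== Notes on version B (the rewrite author's own statement) =====
-- stated objective: simpler
-- what changed: B folds A's three passes (building a flat divisors list, formatting '{}{}{}' strings into a products list, then a stepped-index scan comparing digit sets) into one loop over the same sqrt range that extracts digits arithmetically (divmod by 10) and compares the digit set of a, number//a and number against set(range(1,10)) directly, returning on the first hit; no strings and no intermediate lists.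
import Mathlib
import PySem

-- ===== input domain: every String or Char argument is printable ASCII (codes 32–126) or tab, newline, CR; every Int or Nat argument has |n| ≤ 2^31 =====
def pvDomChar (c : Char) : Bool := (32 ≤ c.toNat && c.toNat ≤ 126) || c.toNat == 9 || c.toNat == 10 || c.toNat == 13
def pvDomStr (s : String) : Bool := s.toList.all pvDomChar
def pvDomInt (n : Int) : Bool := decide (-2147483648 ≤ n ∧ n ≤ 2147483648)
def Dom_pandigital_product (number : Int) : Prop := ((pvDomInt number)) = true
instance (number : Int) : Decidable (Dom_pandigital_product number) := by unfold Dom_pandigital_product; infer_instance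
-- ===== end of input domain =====

-- B replaces A's three passes (divisor list, product strings, stepped-index digit-set scan) by one
-- loop over the same range with arithmetic digit extraction — no strings, no intermediate lists;
-- objective: simpler.

-- ceil(sqrt(number)) of Python's float sqrt; exact for 0 ≤ number ≤ 2^31 (shared by both ports)
def pyCeilSqrt (n : Int) : Int :=
  if Nat.sqrt n.toNat * Nat.sqrt n.toNat = n.toNat then (Nat.sqrt n.toNat : Int)
  else (Nat.sqrt n.toNat : Int) + 1

-- ===== PORT A =====
-- helper divisors(number): a foldl doing the two appends of the Python loop
def divisorsA (number : Int) : List Int :=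
  (PySem.List.pyRange 1 (pyCeilSqrt number + 1)).foldl
    (fun acc a =>
      if PySem.Int.mod number a == 0 then
        acc ++ [a] ++ [PySem.Int.floordiv number a]
      else acc) []

-- module constant: digits = set(range(1,10))
def digitsConstA : PySem.Set Int := PySem.Set.ofList (PySem.List.pyRange 1 10)

-- int(e) on a one-character string (every e here is a decimal digit char, so ofChars? is some)
def intOfDigit (c : Char) : Int := (PySem.Int.ofChars? [c]).getD 0

def pandigital_product (number : Int) : Bool :=
  let itsdivisors := divisorsA number
  -- '{}{}{}'.format(d1, d2, number) followed by list(...): the concatenated digit characters;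
  -- itsdivisors[e] as pyGetD (e and e+1 are always in range: the list has even length)
  let products := (PySem.List.pyRange 0 ((itsdivisors.length : Int) - 1) 2).map
    (fun e => PySem.Int.toChars (PySem.List.pyGetD itsdivisors e 0)
           ++ PySem.Int.toChars (PySem.List.pyGetD itsdivisors (e + 1) 0)
           ++ PySem.Int.toChars number)
  -- the for / else with break: True iff some product passes the set test
  products.any (fun p => PySem.Set.equal digitsConstA (PySem.Set.ofList (p.map intOfDigit)))

-- ===== PORT B =====
-- _digs(n): digits of n by repeated divmod, least significant first
def digsB (n : Int) : List Int :=
  if 0 < n then PySem.Int.mod n 10 :: digsB (PySem.Int.floordiv n 10) else []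
termination_by n.toNat
decreasing_by
  rw [PySem.Int.floordiv_eq_ediv_of_pos (by norm_num)]
  omega

def pandigital_product_alt (number : Int) : Bool :=
  (PySem.List.pyRange 1 (pyCeilSqrt number + 1)).any fun a =>
    PySem.Int.mod number a == 0 &&
    PySem.Set.equal
      (PySem.Set.ofList (digsB a ++ digsB (PySem.Int.floordiv number a) ++ digsB number))
      (PySem.Set.ofList (PySem.List.pyRange 1 10))

-- ===== PRECONDITION & SPEC =====
-- Pre_ excludes negative numbers only: math.sqrt raises ValueError there (B raises there too).
def Pre_pandigital_product (number : Int) : Prop := 0 ≤ number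
instance (number : Int) : Decidable (Pre_pandigital_product number) := by unfold Pre_pandigital_product; infer_instance
def pvWitness_pandigital_product : Int := 4

def Spec_pandigital_product (number : Int) (out : Bool) : Prop := out = pandigital_product_alt number
instance (number : Int) (out : Bool) : Decidable (Spec_pandigital_product number out) := by unfold Spec_pandigital_product; infer_instance

-- ===== CLAIM (what is proved, stated in full; the proofs are below) =====
def Claim_equal_pandigital_product : Prop := ∀ (number : Int), Dom_pandigital_product number → Pre_pandigital_product number → Spec_pandigital_product number (pandigital_product number)

-- ===== LEMMAS AND PROOFS =====

-- A's divisors list is the flattened list of (a, number//a) pairs over the surviving a's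
def pairsOf (number : Int) : List (Int × Int) :=
  ((PySem.List.pyRange 1 (pyCeilSqrt number + 1)).filter
    (fun a => PySem.Int.mod number a == 0)).map
    (fun a => (a, PySem.Int.floordiv number a))

theorem divisorsA_eq_flat (number : Int) :
    divisorsA number = (pairsOf number).flatMap (fun p => [p.1, p.2]) := by
  unfold divisorsA pairsOf
  have h : (fun (acc : List Int) (a : Int) =>
      if PySem.Int.mod number a == 0 then acc ++ [a] ++ [PySem.Int.floordiv number a] else acc)
      = (fun acc a => acc ++ (if PySem.Int.mod number a == 0 then [a, PySem.Int.floordiv number a] else [])) := by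
    funext acc a; split <;> simp
  rw [h, PySem.List.foldl_append_eq_flatMap, List.flatMap_map, List.nil_append]
  induction PySem.List.pyRange 1 (pyCeilSqrt number + 1) with
  | nil => rfl
  | cons a L ih =>
      simp only [List.flatMap_cons, List.filter_cons]
      by_cases hc : (PySem.Int.mod number a == 0) = true
      · rw [if_pos hc, if_pos hc, List.flatMap_cons]
        congr 1
      · rw [if_neg hc, if_neg hc]
        exact ih

theorem flat_length (P : List (Int × Int)) :
    (P.flatMap (fun p => [p.1, p.2])).length = 2 * P.length := by
  induction P with
  | nil => rfl
  | cons p P ih => simp [List.flatMap_cons, ih]; omega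

-- the stepped-index pass over the flattened pair list is a map over the pairs
theorem stepped_idx {β : Type} (P : List (Int × Int)) (f : Int → Int → β) :
    (List.range P.length).map
      (fun k => f ((P.flatMap (fun p => [p.1, p.2])).getD (2 * k) 0)
                  ((P.flatMap (fun p => [p.1, p.2])).getD (2 * k + 1) 0))
      = P.map (fun p => f p.1 p.2) := by
  induction P with
  | nil => rfl
  | cons p P ih =>
      simp only [List.length_cons, List.range_succ_eq_map, List.map_cons, List.map_map,
        List.flatMap_cons]
      congr 1

theorem pyRange_step2 (m : Nat) :
    PySem.List.pyRange 0 ((2 * m : Int) - 1) 2 = (List.range m).map (fun k : Nat => (2 * (k:Int))) := by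
  rw [PySem.List.pyRange_of_pos 0 ((2*(m:Int))-1) (s := 2) (by norm_num)]
  rcases Nat.eq_zero_or_pos m with h | h
  · subst h; norm_num
  · have h1 : (0:Int) < 2 * m - 1 := by omega
    rw [if_pos h1]
    have h2 : ((2 * (m:Int) - 1 - 0 + 2 - 1) / 2).toNat = m := by omega
    rw [h2]
    simp

theorem intOfDigit_digitChar (d : Nat) (h : d < 10) : intOfDigit (Nat.digitChar d) = d := by
  interval_cases d <;> decide

theorem digsB_natCast (n : Nat) (h : 0 < n) :
    digsB (n : Int) = ((n % 10 : Nat) : Int) :: digsB ((n / 10 : Nat) : Int) := by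
  rw [digsB]
  rw [if_pos (by exact_mod_cast h)]
  congr 1
  · exact PySem.Int.mod_natCast n 10
  · congr 1
    exact PySem.Int.floordiv_natCast n 10

theorem toDigits_digs (n : Nat) (h : 0 < n) :
    (Nat.toDigits 10 n).map intOfDigit = (digsB (n : Int)).reverse := by
  induction n using Nat.strong_induction_on with
  | _ n ih =>
    rw [digsB_natCast n h]
    by_cases h10 : n < 10
    · rw [Nat.toDigits_of_lt_base h10]
      have h0 : n / 10 = 0 := by omega
      rw [h0]
      simp [digsB, intOfDigit_digitChar n h10, Nat.mod_eq_of_lt h10]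
    · rw [Nat.toDigits_of_base_le (by norm_num) (by omega)]
      rw [List.map_append, ih (n / 10) (by omega) (by omega), List.reverse_cons]
      simp [intOfDigit_digitChar (n % 10) (by omega)]

-- digits of str(m) read back as ints are B's digit list, reversed (m ≥ 1)
theorem toChars_digs (m : Int) (h : 0 < m) :
    (PySem.Int.toChars m).map intOfDigit = (digsB m).reverse := by
  have hm : m = ((m.toNat : Nat) : Int) := by omega
  rw [hm]
  rw [show PySem.Int.toChars ((m.toNat : Nat) : Int) = Nat.toDigits 10 m.toNat by
    simp [PySem.Int.toChars]; congr 1; omega]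
  exact toDigits_digs m.toNat (by omega)

theorem pyCeilSqrt_le_self (n : Int) (h : 1 ≤ n) : pyCeilSqrt n ≤ n := by
  unfold pyCeilSqrt
  have h1 : 1 ≤ n.toNat := by omega
  have hs : Nat.sqrt n.toNat ≤ n.toNat := Nat.sqrt_le_self _
  by_cases hsq : Nat.sqrt n.toNat * Nat.sqrt n.toNat = n.toNat
  · rw [if_pos hsq]; omega
  · rw [if_neg hsq]
    rcases Nat.lt_or_ge n.toNat 2 with h2 | h2
    · exfalso
      have h3 : n.toNat = 1 := by omega
      rw [h3] at hsq
      exact hsq rfl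
    · have := Nat.sqrt_lt_self h2
      omega

theorem any_congr_mem {α : Type} (l : List α) (p q : α → Bool)
    (h : ∀ a ∈ l, p a = q a) : l.any p = l.any q := by
  induction l with
  | nil => rfl
  | cons a l ih =>
      simp only [List.any_cons, h a (by simp), ih (fun b hb => h b (by simp [hb]))]

-- A's digit-set test on the format string equals B's digit-set test on the arithmetic digits
theorem check_eq (n a : Int) (hn : 0 < n) (ha : 0 < a) (hfd : 0 < PySem.Int.floordiv n a) :
    PySem.Set.equal digitsConstA
      (PySem.Set.ofList ((PySem.Int.toChars a ++ PySem.Int.toChars (PySem.Int.floordiv n a)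
        ++ PySem.Int.toChars n).map intOfDigit))
    = PySem.Set.equal
        (PySem.Set.ofList (digsB a ++ digsB (PySem.Int.floordiv n a) ++ digsB n))
        (PySem.Set.ofList (PySem.List.pyRange 1 10)) := by
  rw [Bool.eq_iff_iff, PySem.Set.equal_iff, PySem.Set.equal_iff]
  unfold digitsConstA
  constructor
  · intro hh x
    have := (hh x).symm
    simp only [PySem.Set.mem_ofList, List.map_append, List.mem_append,
      toChars_digs a ha, toChars_digs _ hfd, toChars_digs n hn, List.mem_reverse] at this ⊢
    tauto
  · intro hh x
    have := (hh x).symm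
    simp only [PySem.Set.mem_ofList, List.map_append, List.mem_append,
      toChars_digs a ha, toChars_digs _ hfd, toChars_digs n hn, List.mem_reverse] at this ⊢
    tauto

-- ===== VERDICT (by name: the statement is the Claim_ definition above) =====
theorem pandigital_product_spec : Claim_equal_pandigital_product := by
  intro n _ hpre
  unfold Spec_pandigital_product
  rcases eq_or_lt_of_le hpre with h0 | hn
  · subst h0; decide
  -- n ≥ 1 from here on
  unfold pandigital_product pandigital_product_alt
  dsimp only
  rw [divisorsA_eq_flat, flat_length]
  have hcast : ((2 * (pairsOf n).length : Nat) : Int) - 1 = (2 * ((pairsOf n).length : Nat) : Int) - 1 := by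
    push_cast; ring
  rw [hcast, pyRange_step2, List.map_map]
  have hmap : ((List.range (pairsOf n).length).map
      ((fun e => PySem.Int.toChars (PySem.List.pyGetD ((pairsOf n).flatMap (fun p => [p.1, p.2])) e 0)
           ++ PySem.Int.toChars (PySem.List.pyGetD ((pairsOf n).flatMap (fun p => [p.1, p.2])) (e + 1) 0)
           ++ PySem.Int.toChars n) ∘ (fun k : Nat => (2 * (k:Int)))))
      = (pairsOf n).map (fun p => PySem.Int.toChars p.1 ++ PySem.Int.toChars p.2 ++ PySem.Int.toChars n) := by
    rw [show ((fun e => PySem.Int.toChars (PySem.List.pyGetD ((pairsOf n).flatMap (fun p => [p.1, p.2])) e 0)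
           ++ PySem.Int.toChars (PySem.List.pyGetD ((pairsOf n).flatMap (fun p => [p.1, p.2])) (e + 1) 0)
           ++ PySem.Int.toChars n) ∘ (fun k : Nat => (2 * (k:Int))))
        = (fun k : Nat => PySem.Int.toChars (((pairsOf n).flatMap (fun p => [p.1, p.2])).getD (2*k) 0)
           ++ PySem.Int.toChars (((pairsOf n).flatMap (fun p => [p.1, p.2])).getD (2*k+1) 0)
           ++ PySem.Int.toChars n) from ?_]
    · exact stepped_idx (pairsOf n)
        (fun x y => PySem.Int.toChars x ++ PySem.Int.toChars y ++ PySem.Int.toChars n)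
    · funext k
      have e1 : (2 * (k:Int)) = ((2*k : Nat) : Int) := by push_cast; ring
      have e2 : (((2*k : Nat) : Int)) + 1 = ((2*k+1 : Nat) : Int) := by push_cast; ring
      simp only [Function.comp, e1, e2, PySem.List.pyGetD_natCast]
  rw [hmap]
  unfold pairsOf
  rw [List.any_map, List.any_map, List.any_filter]
  apply any_congr_mem
  intro a ha
  by_cases hc : (PySem.Int.mod n a == 0) = true
  · rw [hc, Bool.true_and, Bool.true_and]
    have ha1 : 0 < a := by
      have := (PySem.List.mem_pyRange_one.mp ha).1
      omega
    have han : a ≤ n := le_trans (by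
        have := (PySem.List.mem_pyRange_one.mp ha).2
        have := pyCeilSqrt_le_self n (by omega)
        omega) (le_refl n)
    have hfd : 0 < PySem.Int.floordiv n a := by
      rw [PySem.Int.floordiv_eq_ediv_of_pos ha1]
      have := Int.le_ediv_iff_mul_le (a := 1) (b := n) ha1
      omega
    exact check_eq n a hn ha1 hfd
  · simp only [Bool.not_eq_true] at hc
    rw [hc, Bool.false_and, Bool.false_and]
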